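-- pv_equiv track=rewrite | github.com/YueZhengMeng/nlp-beginner-implement | lab1/tokenizers.py | segment_BPE
-- ===== SOURCE A (Python) =====
-- def segment_BPE(tokens, vocab):
--     outputs = []
--     for token in tokens:
--         # start与end最初指向token的开头和结尾的字符
--         start, end = 0, len(token)
--         cur_output = []
--         # 具有符号中可能最长子字的词元段
--         while start < len(token) and start < end:
--             # 找前缀匹配符号
--             if token[start: end] in vocab.keys() and len(cur_output) == 0:
--                 cur_output.append(token[start: end])
--                 # start指向end，end重新指向token的结尾
--                 start = end
--                 end = len(token)
--             # 找后缀匹配符号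
--             elif '#' + token[start: end] in vocab.keys() and len(cur_output) != 0:
--                 cur_output.append('#' + token[start: end])
--                 # start指向end，end重新指向token的结尾
--                 start = end
--                 end = len(token)
--             else:
--                 if start + 1 == end:
--                     # 如果token[start: end]仅为一个字符且不在vocab中
--                     # 将<UNK>添加到输出中，并跳过这个字符
--                     cur_output.append('<UNK>')
--                     start = end
--                     end = len(token)
--                 else:
--                     # 否则，end向前移动一个字符，缩短匹配区间
--                     end -= 1
--         # 如果没有匹配到任何字符，将<UNK>添加到输出中
--         if len(cur_output) == 0:
--             cur_output.append('<UNK>')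
--         outputs.append(cur_output)
--     return outputs
-- ===== SOURCE B (Python) =====
-- def segment_BPE(tokens, vocab):
--     keys = list(vocab.keys())
--     cont = [k[1:] for k in keys if k.startswith('#')]
--     index = {}
--     for k in keys:
--         if k:
--             index.setdefault(k[0], []).append(k)
--     cindex = {}
--     for k in cont:
--         if k:
--             cindex.setdefault(k[0], []).append(k)
--     outputs = []
--     for token in tokens:
--         pieces = []
--         start = 0
--         while start < len(token):
--             bucket = (index if len(pieces) == 0 else cindex).get(token[start], [])
--             best = 0
--             for k in bucket:
--                 if len(k) > best and token[start:start + len(k)] == k: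
--                     best = len(k)
--             if best == 0:
--                 pieces.append('<UNK>')
--                 start += 1
--             else:
--                 piece = token[start:start + best]
--                 pieces.append(piece if len(pieces) == 0 else '#' + piece)
--                 start += best
--         if len(pieces) == 0:
--             pieces.append('<UNK>')
--         outputs.append(pieces)
--     return outputs
-- ===== Notes on version B (the rewrite author's own statement) =====
-- stated objective: alternative
-- what changed: A shrinks the slice token[start:end] one character at a time, testing every substring against the vocabulary dict; B instead builds a first-character index of the vocabulary once (with the '#'-continuation keys stripped into their own index) and, per position, scans only the bucket of keys starting with the current character, keeping the longest one that matches.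
import Mathlib
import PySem

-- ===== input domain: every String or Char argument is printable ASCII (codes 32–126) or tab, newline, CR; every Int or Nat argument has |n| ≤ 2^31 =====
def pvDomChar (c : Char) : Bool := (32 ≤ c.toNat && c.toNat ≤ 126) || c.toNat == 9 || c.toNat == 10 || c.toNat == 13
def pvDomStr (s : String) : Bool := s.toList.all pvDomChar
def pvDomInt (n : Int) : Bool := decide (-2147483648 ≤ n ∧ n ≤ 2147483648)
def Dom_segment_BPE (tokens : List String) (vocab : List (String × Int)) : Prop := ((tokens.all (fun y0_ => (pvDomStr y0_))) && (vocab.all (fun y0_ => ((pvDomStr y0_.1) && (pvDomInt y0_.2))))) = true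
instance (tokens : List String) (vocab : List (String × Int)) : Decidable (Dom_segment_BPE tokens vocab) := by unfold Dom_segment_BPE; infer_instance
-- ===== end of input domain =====

-- B replaces A's descending shrink-the-slice scan (test every substring token[start:end] against the
-- vocabulary) by a first-character index of the vocabulary built once up front (the '#'-continuation
-- keys stripped into their own index): per position it scans only the bucket of keys that start with
-- the current character, keeping the longest one that matches; objective: alternative.

-- ===== PORT A =====
-- inner `while start < len(token) and start < end` loop of A; state (start, end, cur_output)
def pvAloop (tok : List Char) (keys : List (List Char)) (start e : Nat) (cur : List (List Char)) : List (List Char) :=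
  if h : start < tok.length ∧ start < e then
    let sub := PySem.List.slice tok (some (start : Int)) (some (e : Int))   -- token[start:end]
    if sub ∈ keys ∧ cur.length = 0 then
      pvAloop tok keys e tok.length (cur ++ [sub])
    else if ('#' :: sub) ∈ keys ∧ cur.length ≠ 0 then
      pvAloop tok keys e tok.length (cur ++ ['#' :: sub])
    else if start + 1 = e then
      pvAloop tok keys e tok.length (cur ++ [['<', 'U', 'N', 'K', '>']])
    else
      pvAloop tok keys start (e - 1) cur
  else cur
termination_by (tok.length - start, e)
decreasing_by
  · exact Prod.Lex.left _ _ (by omega)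
  · exact Prod.Lex.left _ _ (by omega)
  · exact Prod.Lex.left _ _ (by omega)
  · exact Prod.Lex.right _ (by omega)

def segment_BPE (tokens : List String) (vocab : List (String × Int)) : List (List String) :=
  let keys := ((PySem.Dict.ofList vocab).keys).map String.toList   -- vocab.keys()
  tokens.map (fun token =>
    let tok := token.toList
    let cur := pvAloop tok keys 0 tok.length []
    let cur := if cur.length = 0 then cur ++ [['<', 'U', 'N', 'K', '>']] else cur
    cur.map String.ofList)

-- ===== PORT B =====
-- longest key of `cands` matching token at position start (0 if none): one pass over the key list
def pvBbest (tok : List Char) (start : Nat) (cands : List (List Char)) : Nat :=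
  cands.foldl (fun best k =>
    if k.length > best ∧ PySem.List.slice tok (some (start : Int)) (some ((start + k.length : Nat) : Int)) = k
    then k.length else best) 0

-- `while start < len(token)` loop of B; state (start, pieces); `index`/`cindex` are the
-- first-character buckets (keys are Chars: a Python 1-character string k[0] is exactly one Char here)
def pvBloop (tok : List Char) (index cindex : PySem.Dict Char (List (List Char))) (start : Nat) (pieces : List (List Char)) : List (List Char) :=
  if h : start < tok.length then
    let bucket := (if pieces.length = 0 then index else cindex).getD (tok[start]'h) []
    let best := pvBbest tok start bucket
    if hb : best = 0 then
      pvBloop tok index cindex (start + 1) (pieces ++ [['<', 'U', 'N', 'K', '>']])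
    else
      let piece := PySem.List.slice tok (some (start : Int)) (some ((start + best : Nat) : Int))
      pvBloop tok index cindex (start + best) (pieces ++ [if pieces.length = 0 then piece else '#' :: piece])
  else pieces
termination_by tok.length - start
decreasing_by
  · omega
  · exact Nat.sub_lt_sub_left h (Nat.lt_add_of_pos_right (Nat.pos_of_ne_zero hb))

def segment_BPE_alt (tokens : List String) (vocab : List (String × Int)) : List (List String) :=
  let keys := ((PySem.Dict.ofList vocab).keys).map String.toList   -- list(vocab.keys())
  let cont := (keys.filter (fun k => PySem.Chars.startswith k ['#'])).map
    (fun k => PySem.List.slice k (some 1) none)                    -- k[1:] for k starting with '#'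
  -- `index.setdefault(k[0], []).append(k)` is d[k[0]] = d.get(k[0], []) + [k], exact incl. key order
  let index := keys.foldl (fun d k =>
    match k with
    | [] => d
    | c :: _ => d.modify c [] (fun l => l ++ [k])) PySem.Dict.empty
  let cindex := cont.foldl (fun d k =>
    match k with
    | [] => d
    | c :: _ => d.modify c [] (fun l => l ++ [k])) PySem.Dict.empty
  tokens.map (fun token =>
    let tok := token.toList
    let pieces := pvBloop tok index cindex 0 []
    let pieces := if pieces.length = 0 then pieces ++ [['<', 'U', 'N', 'K', '>']] else pieces
    pieces.map String.ofList)

-- ===== PRECONDITION & SPEC =====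
def Spec_segment_BPE (tokens : List String) (vocab : List (String × Int)) (out : List (List String)) : Prop := out = segment_BPE_alt tokens vocab
instance (tokens : List String) (vocab : List (String × Int)) (out : List (List String)) : Decidable (Spec_segment_BPE tokens vocab out) := by unfold Spec_segment_BPE; infer_instance

-- ===== CLAIM (what is proved, stated in full; the proofs are below) =====
def Claim_equal_segment_BPE : Prop := ∀ (tokens : List String) (vocab : List (String × Int)), Dom_segment_BPE tokens vocab → Spec_segment_BPE tokens vocab (segment_BPE tokens vocab)

-- ===== LEMMAS AND PROOFS =====

-- B's continuation-key list contains exactly the stripped '#'-keys of the vocabulary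
lemma pv_mem_cont (keys : List (List Char)) (x : List Char) :
    x ∈ (keys.filter (fun k => PySem.Chars.startswith k ['#'])).map
        (fun k => PySem.List.slice k (some 1) none) ↔ ('#' :: x) ∈ keys := by
  have h1 : ∀ k : List Char, PySem.List.slice k (some 1) none = k.drop 1 := fun k => by
    have : (1 : Int) = ((1 : Nat) : Int) := rfl
    rw [this, PySem.List.slice_from_natCast]
  simp only [List.mem_map, List.mem_filter, h1]
  constructor
  · rintro ⟨k, ⟨hk, hsw⟩, rfl⟩
    simp only [PySem.Chars.startswith, List.isPrefixOf_iff_prefix] at hsw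
    obtain ⟨t, rfl⟩ := hsw
    simpa using hk
  · intro hk
    exact ⟨'#' :: x, ⟨hk, by simp [PySem.Chars.startswith]⟩, rfl⟩

-- a key matches at `start` (B's slice comparison) iff it is a prefix of the remaining characters
lemma pv_slice_eq_iff_prefix (tok k : List Char) (start : Nat) :
    PySem.List.slice tok (some (start : Int)) (some ((start + k.length : Nat) : Int)) = k
      ↔ k <+: tok.drop start := by
  rw [PySem.List.slice_natCast, List.prefix_iff_eq_take]
  have h : start + k.length - start = k.length := by omega
  rw [h]
  exact eq_comm

-- the slice token[start:m] is a member of `cands` iff some candidate key of length m - start matches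
lemma pv_match_iff (tok : List Char) (cands : List (List Char)) (start m : Nat)
    (h2 : m ≤ tok.length) :
    (PySem.List.slice tok (some (start : Int)) (some (m : Int)) ∈ cands) ↔
      ∃ k ∈ cands, k <+: tok.drop start ∧ k.length = m - start := by
  rw [PySem.List.slice_natCast]
  constructor
  · intro hmem
    refine ⟨_, hmem, List.take_prefix _ _, ?_⟩
    simp [List.length_take, List.length_drop]
    omega
  · rintro ⟨k, hk, hpre, hlen⟩
    have h := List.prefix_iff_eq_take.mp hpre
    rw [← hlen, ← h]
    exact hk

-- invariant of B's fold: the accumulator only grows, ends at a matching key's length (or stays),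
-- and bounds the length of every matching candidate seen so far (or the candidate predates acc)
lemma pv_bbest_go (tok : List Char) (start : Nat) :
    ∀ (cands : List (List Char)) (acc : Nat),
      acc ≤ cands.foldl (fun best k =>
        if k.length > best ∧ PySem.List.slice tok (some (start : Int)) (some ((start + k.length : Nat) : Int)) = k
        then k.length else best) acc ∧
      (cands.foldl (fun best k =>
        if k.length > best ∧ PySem.List.slice tok (some (start : Int)) (some ((start + k.length : Nat) : Int)) = k
        then k.length else best) acc = acc ∨
        ∃ k ∈ cands, k <+: tok.drop start ∧ k.length = cands.foldl (fun best k =>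
        if k.length > best ∧ PySem.List.slice tok (some (start : Int)) (some ((start + k.length : Nat) : Int)) = k
        then k.length else best) acc) ∧
      (∀ k ∈ cands, k <+: tok.drop start → k.length ≤ cands.foldl (fun best k =>
        if k.length > best ∧ PySem.List.slice tok (some (start : Int)) (some ((start + k.length : Nat) : Int)) = k
        then k.length else best) acc ∨ k.length ≤ acc) := by
  intro cands
  induction cands with
  | nil => intro acc; simp
  | cons c cs ih =>
    intro acc
    simp only [List.foldl_cons]
    by_cases hc : c.length > acc ∧ PySem.List.slice tok (some (start : Int)) (some ((start + c.length : Nat) : Int)) = c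
    · rw [if_pos hc]
      obtain ⟨hmono, hex, hall⟩ := ih c.length
      refine ⟨by omega, ?_, ?_⟩
      · rcases hex with h | ⟨k, hk, hp, hl⟩
        · exact Or.inr ⟨c, by simp, (pv_slice_eq_iff_prefix tok c start).mp hc.2, h.symm ▸ rfl⟩
        · exact Or.inr ⟨k, by simp [hk], hp, hl⟩
      · intro k hk hp
        rcases List.mem_cons.mp hk with rfl | hk'
        · left; omega
        · rcases hall k hk' hp with h | h
          · left; exact h
          · left; omega
    · rw [if_neg hc]
      obtain ⟨hmono, hex, hall⟩ := ih acc
      refine ⟨hmono, ?_, ?_⟩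
      · rcases hex with h | ⟨k, hk, hp, hl⟩
        · exact Or.inl h
        · exact Or.inr ⟨k, by simp [hk], hp, hl⟩
      · intro k hk hp
        rcases List.mem_cons.mp hk with rfl | hk'
        · right
          rw [pv_slice_eq_iff_prefix] at hc
          by_cases hlen : k.length > acc
          · exact absurd ⟨hlen, hp⟩ hc
          · omega
        · rcases hall k hk' hp with h | h
          · left; exact h
          · right; exact h

-- pvBbest computes the maximal length of a matching candidate (0 if none matches)
lemma pv_bbest_spec (tok : List Char) (start : Nat) (cands : List (List Char)) :
    (∀ k ∈ cands, k <+: tok.drop start → k.length ≤ pvBbest tok start cands) ∧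
    (pvBbest tok start cands = 0 ∨
      ∃ k ∈ cands, k <+: tok.drop start ∧ k.length = pvBbest tok start cands ∧ 0 < pvBbest tok start cands) := by
  obtain ⟨hmono, hex, hall⟩ := pv_bbest_go tok start cands 0
  constructor
  · intro k hk hp
    rcases hall k hk hp with h | h
    · exact h
    · omega
  · rcases hex with h | ⟨k, hk, hp, hl⟩
    · exact Or.inl h
    · by_cases h0 : pvBbest tok start cands = 0
      · exact Or.inl h0
      · exact Or.inr ⟨k, hk, hp, hl, by omega⟩

-- A's descending scan from `e`, given that nothing in (e, len] matches, performs exactly one greedy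
-- step: consume the longest match over the whole remaining tail, or emit <UNK> and advance by one
lemma pv_descend (tok : List Char) (keys cont : List (List Char))
    (hcont : ∀ x, x ∈ cont ↔ ('#' :: x) ∈ keys)
    (start : Nat) (hs : start < tok.length) (cur : List (List Char)) :
    ∀ e, start < e → e ≤ tok.length →
    (∀ m, e < m → m ≤ tok.length →
      ¬ ((if cur.length = 0 then PySem.List.slice tok (some (start : Int)) (some (m : Int)) ∈ keys
          else ('#' :: PySem.List.slice tok (some (start : Int)) (some (m : Int))) ∈ keys))) →
    pvAloop tok keys start e cur =
      (if pvBbest tok start (if cur.length = 0 then keys else cont) = 0 then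
        pvAloop tok keys (start + 1) tok.length (cur ++ [['<', 'U', 'N', 'K', '>']])
      else
        pvAloop tok keys (start + pvBbest tok start (if cur.length = 0 then keys else cont)) tok.length
          (cur ++ [if cur.length = 0
            then PySem.List.slice tok (some (start : Int))
              (some ((start + pvBbest tok start (if cur.length = 0 then keys else cont) : Nat) : Int))
            else '#' :: PySem.List.slice tok (some (start : Int))
              (some ((start + pvBbest tok start (if cur.length = 0 then keys else cont) : Nat) : Int))])) := by
  set cands := if cur.length = 0 then keys else cont with hcands
  set best := pvBbest tok start cands with hbest
  intro e
  induction e using Nat.strong_induction_on with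
  | _ e ih =>
  intro he1 he2 hinv
  have hsel : ∀ s : List Char,
      (if cur.length = 0 then s ∈ keys else ('#' :: s) ∈ keys) ↔ s ∈ cands := by
    intro s
    by_cases hc : cur.length = 0
    · simp [hc, hcands]
    · simp [hc, hcands, hcont]
  have hub : 0 < best → start + best ≤ e := by
    intro hpos
    rcases (pv_bbest_spec tok start cands).2 with h0 | ⟨k, hk, hp, hl, _⟩
    · omega
    · by_contra hgt
      have hlen : k.length ≤ tok.length - start := by
        simpa using hp.length_le
      have hmem : PySem.List.slice tok (some (start : Int)) (some ((start + best : Nat) : Int)) ∈ cands := by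
        rw [pv_match_iff tok cands start (start + best) (by omega)]
        exact ⟨k, hk, hp, by omega⟩
      have := hinv (start + best) (by omega) (by omega)
      rw [hsel] at this
      exact this hmem
  have hQe : (PySem.List.slice tok (some (start : Int)) (some (e : Int)) ∈ cands) ↔
      ∃ k ∈ cands, k <+: tok.drop start ∧ k.length = e - start :=
    pv_match_iff tok cands start e he2
  rw [pvAloop]
  rw [dif_pos ⟨hs, he1⟩]
  by_cases hQ : PySem.List.slice tok (some (start : Int)) (some (e : Int)) ∈ cands
  · have hbe : best = e - start := by
      obtain ⟨k, hk, hp, hl⟩ := hQe.mp hQ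
      have h1 : e - start ≤ best := hl ▸ (pv_bbest_spec tok start cands).1 k hk hp
      have h2 : start + best ≤ e := hub (by omega)
      omega
    have hpiece : PySem.List.slice tok (some (start : Int)) (some ((start + best : Nat) : Int)) =
        PySem.List.slice tok (some (start : Int)) (some (e : Int)) := by
      congr 2
      omega
    by_cases hc : cur.length = 0
    · rw [if_pos ⟨by simpa [hc] using (hsel _).mpr hQ, hc⟩]
      rw [if_neg (show ¬ best = 0 by omega), if_pos hc, hpiece,
        show start + best = e by omega]
    · rw [if_neg (fun h => hc h.2), if_pos ⟨by simpa [hc] using (hsel _).mpr hQ, hc⟩]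
      rw [if_neg (show ¬ best = 0 by omega), if_neg hc, hpiece,
        show start + best = e by omega]
  · have hnb1 : ¬ (PySem.List.slice tok (some (start : Int)) (some (e : Int)) ∈ keys ∧ cur.length = 0) := by
      rintro ⟨hmem, hc⟩
      exact hQ ((hsel _).mp (by simp [hc, hmem]))
    have hnb2 : ¬ (('#' :: PySem.List.slice tok (some (start : Int)) (some (e : Int))) ∈ keys ∧ cur.length ≠ 0) := by
      rintro ⟨hmem, hc⟩
      exact hQ ((hsel _).mp (by simp [hc, hmem]))
    rw [if_neg hnb1, if_neg hnb2]
    have hinv2 : ∀ m, e - 1 < m → m ≤ tok.length →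
        ¬ ((if cur.length = 0 then PySem.List.slice tok (some (start : Int)) (some (m : Int)) ∈ keys
            else ('#' :: PySem.List.slice tok (some (start : Int)) (some (m : Int))) ∈ keys)) := by
      intro m hm1 hm2
      by_cases hme : m = e
      · subst hme
        rw [hsel]
        exact hQ
      · exact hinv m (by omega) hm2
    by_cases hse : start + 1 = e
    · rw [if_pos hse]
      have hb0 : best = 0 := by
        rcases (pv_bbest_spec tok start cands).2 with h0 | ⟨k, hk, hp, hl, hpos⟩
        · exact h0
        · exfalso
          have hlen : k.length ≤ tok.length - start := by simpa using hp.length_le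
          have hmem : PySem.List.slice tok (some (start : Int)) (some ((start + best : Nat) : Int)) ∈ cands := by
            rw [pv_match_iff tok cands start (start + best) (by omega)]
            exact ⟨k, hk, hp, by omega⟩
          have h2 := hub hpos
          have he : start + best = e := by omega
          rw [he] at hmem
          exact hQ hmem
      rw [if_pos hb0, ← hse]
    · rw [if_neg hse]
      exact ih (e - 1) (by omega) (by omega) (by omega) hinv2

-- the bucket foldl groups the keys by head character, in order
lemma pv_index_getD : ∀ (ks : List (List Char)) (d : PySem.Dict Char (List (List Char))) (c : Char),
    (ks.foldl (fun d k =>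
      match k with
      | [] => d
      | c :: _ => d.modify c [] (fun l => l ++ [k])) d).getD c []
      = d.getD c [] ++ ks.filter (fun k => k.head? == some c) := by
  intro ks
  induction ks with
  | nil => intro d c; simp
  | cons k ks ih =>
    intro d c
    match k with
    | [] => simpa using ih d c
    | ch :: t =>
      rw [List.foldl_cons, ih, List.filter_cons]
      by_cases hc : ch = c
      · subst hc
        rw [PySem.Dict.getD_modify]
        simp
      · rw [PySem.Dict.getD_modify]
        simp [hc, Ne.symm hc]

-- membership in a bucket of the index built from `ks`
lemma pv_mem_index (ks : List (List Char)) (c : Char) (x : List Char) :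
    x ∈ (ks.foldl (fun d k =>
      match k with
      | [] => d
      | c :: _ => d.modify c [] (fun l => l ++ [k])) PySem.Dict.empty).getD c []
      ↔ x ∈ ks ∧ x.head? = some c := by
  rw [pv_index_getD]
  simp [List.mem_filter]

-- a nonempty key matching at `start` necessarily begins with the character at `start`
lemma pv_prefix_head (tok k : List Char) (start : Nat) (hs : start < tok.length)
    (hp : k <+: tok.drop start) (hk : k ≠ []) : k.head? = some (tok[start]'hs) := by
  match k, hk with
  | c :: t, _ =>
    obtain ⟨r, hr⟩ := hp
    have h1 : (tok.drop start).head? = some c := by rw [← hr]; rfl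
    rw [List.head?_drop] at h1
    rw [List.getElem?_eq_getElem hs] at h1
    simpa using h1.symm

-- scanning only the bucket of the current character finds the same longest match
lemma pv_bbest_bucket (tok : List Char) (start : Nat) (hs : start < tok.length)
    (cands bucket : List (List Char))
    (hb : ∀ k, k ∈ bucket ↔ k ∈ cands ∧ k.head? = some (tok[start]'hs)) :
    pvBbest tok start bucket = pvBbest tok start cands := by
  apply Nat.le_antisymm
  · rcases (pv_bbest_spec tok start bucket).2 with h0 | ⟨k, hk, hp, hl, hpos⟩
    · rw [h0]; exact Nat.zero_le _
    · rw [← hl]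
      exact (pv_bbest_spec tok start cands).1 k ((hb k).mp hk).1 hp
  · rcases (pv_bbest_spec tok start cands).2 with h0 | ⟨k, hk, hp, hl, hpos⟩
    · rw [h0]; exact Nat.zero_le _
    · rw [← hl]
      refine (pv_bbest_spec tok start bucket).1 k ((hb k).mpr ⟨hk, ?_⟩) hp
      exact pv_prefix_head tok k start hs hp (by intro h; subst h; simp at hl; omega)

-- the two loops agree from any common state (induction on the number of remaining characters)
lemma pv_loops_eq_aux (tok : List Char) (keys cont : List (List Char))
    (index cindex : PySem.Dict Char (List (List Char)))
    (hcont : ∀ x, x ∈ cont ↔ ('#' :: x) ∈ keys)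
    (hidx : ∀ c x, x ∈ index.getD c [] ↔ x ∈ keys ∧ x.head? = some c)
    (hcidx : ∀ c x, x ∈ cindex.getD c [] ↔ x ∈ cont ∧ x.head? = some c) :
    ∀ n start cur, tok.length - start ≤ n →
      pvAloop tok keys start tok.length cur = pvBloop tok index cindex start cur := by
  intro n
  induction n with
  | zero =>
    intro start cur hn
    rw [pvAloop, pvBloop]
    rw [dif_neg (by omega), dif_neg (by omega)]
  | succ n ih =>
    intro start cur hn
    by_cases hs : start < tok.length
    · rw [pv_descend tok keys cont hcont start hs cur tok.length hs le_rfl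
        (by intro m hm1 hm2; omega)]
      rw [pvBloop, dif_pos hs]
      have hbb : pvBbest tok start ((if cur.length = 0 then index else cindex).getD (tok[start]'hs) [])
          = pvBbest tok start (if cur.length = 0 then keys else cont) := by
        apply pv_bbest_bucket tok start hs
        intro k
        by_cases hc : cur.length = 0
        · simpa [hc] using hidx (tok[start]'hs) k
        · simpa [hc] using hcidx (tok[start]'hs) k
      simp only [hbb]
      by_cases hb : pvBbest tok start (if cur.length = 0 then keys else cont) = 0
      · rw [if_pos hb, dif_pos hb]
        exact ih (start + 1) _ (by omega)
      · rw [if_neg hb, dif_neg hb]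
        exact ih (start + pvBbest tok start (if cur.length = 0 then keys else cont)) _
          (by have := Nat.pos_of_ne_zero hb; omega)
    · rw [pvAloop, pvBloop, dif_neg (by omega), dif_neg hs]

lemma pv_loops_eq (tok : List Char) (keys cont : List (List Char))
    (index cindex : PySem.Dict Char (List (List Char)))
    (hcont : ∀ x, x ∈ cont ↔ ('#' :: x) ∈ keys)
    (hidx : ∀ c x, x ∈ index.getD c [] ↔ x ∈ keys ∧ x.head? = some c)
    (hcidx : ∀ c x, x ∈ cindex.getD c [] ↔ x ∈ cont ∧ x.head? = some c)
    (start : Nat) (cur : List (List Char)) :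
    pvAloop tok keys start tok.length cur = pvBloop tok index cindex start cur :=
  pv_loops_eq_aux tok keys cont index cindex hcont hidx hcidx (tok.length - start) start cur le_rfl

-- ===== VERDICT (by name: the statement is the Claim_ definition above) =====
theorem segment_BPE_spec : Claim_equal_segment_BPE := by
  intro tokens vocab _
  unfold Spec_segment_BPE segment_BPE segment_BPE_alt
  simp only
  apply List.map_congr_left
  intro token _
  rw [pv_loops_eq _ _ (((((PySem.Dict.ofList vocab).keys).map String.toList).filter
        (fun k => PySem.Chars.startswith k ['#'])).map (fun k => PySem.List.slice k (some 1) none))]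
  · intro x
    exact pv_mem_cont _ x
  · intro c x
    exact pv_mem_index _ c x
  · intro c x
    exact pv_mem_index _ c x
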